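-- pv_equiv track=rewrite | github.com/wuyudd/CS155_MiniProject_3 | identify.py | encode
-- ===== SOURCE A (Python) =====
-- def encode(data):
--     '''
--     encode word for input for HMM
--     '''
--     index = 0
--     obs = []
--     obs_map = {}
--     for line in data:
--         curr_line = []
--         for word in line:
--             if word not in obs_map:
--                 obs_map[word] = index
--                 index += 1
--             curr_line.append(obs_map[word])
--         obs.append(curr_line)
--     return obs, obs_map
-- ===== SOURCE B (Python) =====
-- def encode(data):
--     '''
--     encode word for input for HMM
--     '''
--     # materialise (in case data / lines are one-shot iterators)
--     data = [list(line) for line in data]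
--     obs_map = {}
--     # pass 1: assign each distinct word its first-appearance index
--     for line in data:
--         for word in line:
--             if word not in obs_map:
--                 obs_map[word] = len(obs_map)
--     # pass 2: translate every line through the finished map
--     obs = [[obs_map[word] for word in line] for line in data]
--     return obs, obs_map
-- ===== Notes on version B (the rewrite author's own statement) =====
-- stated objective: alternative
-- what changed: The single interleaved loop that grows the map and emits codes at once is replaced by two separate passes: one that only populates obs_map with first-appearance indices (index = len(obs_map)), then a nested comprehension that translates every line through the finished map.
import Mathlib
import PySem

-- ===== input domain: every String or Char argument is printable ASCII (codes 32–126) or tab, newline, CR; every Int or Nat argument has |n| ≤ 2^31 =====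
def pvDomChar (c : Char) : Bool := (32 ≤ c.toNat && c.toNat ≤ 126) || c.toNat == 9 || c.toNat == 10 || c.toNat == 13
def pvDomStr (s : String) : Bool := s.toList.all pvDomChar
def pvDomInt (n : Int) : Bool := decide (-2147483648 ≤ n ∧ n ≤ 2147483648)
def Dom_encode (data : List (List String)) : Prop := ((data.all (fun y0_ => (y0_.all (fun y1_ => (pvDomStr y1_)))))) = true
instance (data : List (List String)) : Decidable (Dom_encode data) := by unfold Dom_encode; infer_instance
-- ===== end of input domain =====

-- B replaces A's single interleaved loop by two passes: first populate obs_map only, then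
-- translate every line through the finished map (alternative decomposition, same cost).

-- ===== PORT A =====
-- one word of A's inner loop: state = (index, obs_map, curr_line)
def encodeWordA (t : Int × PySem.Dict String Int × List Int) (w : String) :
    Int × PySem.Dict String Int × List Int :=
  let m' := if t.2.1.contains w then t.2.1 else t.2.1.insert w t.1
  let idx' := if t.2.1.contains w then t.1 else t.1 + 1
  (idx', m', t.2.2 ++ [m'.getD w 0])

-- one line of A's outer loop: state = (index, obs, obs_map)
def encodeLineA (s : Int × List (List Int) × PySem.Dict String Int) (line : List String) :
    Int × List (List Int) × PySem.Dict String Int :=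
  let r := line.foldl encodeWordA (s.1, s.2.2, [])
  (r.1, s.2.1 ++ [r.2.2], r.2.1)

def encode (data : List (List String)) : List (List Int) × (List (String × Int)) :=
  let s := data.foldl encodeLineA (0, [], PySem.Dict.empty)
  (s.2.1, s.2.2.items)

-- ===== PORT B =====
-- pass-1 step: record a first-seen word with index = len(obs_map)
def seenWordB (m : PySem.Dict String Int) (w : String) : PySem.Dict String Int :=
  if m.contains w then m else m.insert w (m.size : Int)

def seenLineB (m : PySem.Dict String Int) (line : List String) : PySem.Dict String Int :=
  line.foldl seenWordB m

def encode_alt (data : List (List String)) : List (List Int) × (List (String × Int)) :=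
  let m := data.foldl seenLineB PySem.Dict.empty
  (data.map (fun line => line.map (fun w => m.getD w 0)), m.items)

-- ===== PRECONDITION & SPEC =====
def Spec_encode (data : List (List String)) (out : List (List Int) × (List (String × Int))) : Prop := out = encode_alt data
instance (data : List (List String)) (out : List (List Int) × (List (String × Int))) : Decidable (Spec_encode data out) := by unfold Spec_encode; infer_instance

-- ===== CLAIM (what is proved, stated in full; the proofs are below) =====
def Claim_equal_encode : Prop := ∀ (data : List (List String)), Dom_encode data → Spec_encode data (encode data)

-- ===== LEMMAS AND PROOFS =====

-- M extends m: every key present in m keeps its binding in M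
def DExt (m M : PySem.Dict String Int) : Prop :=
  ∀ w, m.contains w = true → M.contains w = true ∧ M.get? w = m.get? w

theorem dext_refl (m : PySem.Dict String Int) : DExt m m := fun _ h => ⟨h, rfl⟩

theorem dext_trans {m₁ m₂ m₃ : PySem.Dict String Int} (h₁ : DExt m₁ m₂) (h₂ : DExt m₂ m₃) :
    DExt m₁ m₃ := by
  intro w hw
  obtain ⟨hc, hg⟩ := h₁ w hw
  obtain ⟨hc', hg'⟩ := h₂ w hc
  exact ⟨hc', hg'.trans hg⟩

theorem dext_seenWordB (m : PySem.Dict String Int) (w : String) : DExt m (seenWordB m w) := by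
  intro w' hw'
  unfold seenWordB
  by_cases h : m.contains w = true
  · simp [h, hw']
  · have hne : w' ≠ w := fun e => h (e ▸ hw')
    simp only [Bool.not_eq_true] at h
    simp only [h, if_false, Bool.false_eq_true]
    refine ⟨by simp [PySem.Dict.contains_insert, hw'], ?_⟩
    exact PySem.Dict.get?_insert_of_ne _ _ hne

theorem dext_seenLineB (line : List String) (m : PySem.Dict String Int) :
    DExt m (seenLineB m line) := by
  induction line generalizing m with
  | nil => exact dext_refl m
  | cons w ws ih =>
      exact dext_trans (dext_seenWordB m w) (ih (seenWordB m w))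

theorem dext_foldl_seenLineB (rest : List (List String)) (m : PySem.Dict String Int) :
    DExt m (rest.foldl seenLineB m) := by
  induction rest generalizing m with
  | nil => exact dext_refl m
  | cons l ls ih => exact dext_trans (dext_seenLineB l m) (ih (seenLineB m l))

theorem contains_seenWordB_self (m : PySem.Dict String Int) (w : String) :
    (seenWordB m w).contains w = true := by
  unfold seenWordB
  by_cases h : m.contains w = true
  · simp [h]
  · simp only [Bool.not_eq_true] at h
    simp [h, PySem.Dict.contains_insert_self]

-- A's inner loop, started with index = size of the map, computes B's pass-1 map for the line,
-- keeps the index in sync, and appends exactly the codes any extension M of that map assigns.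
theorem inner_spec (line : List String) (m M : PySem.Dict String Int) (cl : List Int)
    (hext : DExt (seenLineB m line) M) :
    line.foldl encodeWordA ((m.size : Int), m, cl) =
      (((seenLineB m line).size : Int), seenLineB m line,
        cl ++ line.map (fun w => M.getD w 0)) := by
  induction line generalizing m cl with
  | nil => simp [seenLineB]
  | cons w ws ih =>
      have hstep : seenLineB m (w :: ws) = seenLineB (seenWordB m w) ws := by
        simp [seenLineB]
      rw [hstep] at hext
      have hcont : (seenLineB (seenWordB m w) ws).contains w = true :=
        (dext_seenLineB ws (seenWordB m w) w (contains_seenWordB_self m w)).1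
      have hMw : M.get? w = (seenWordB m w).get? w := by
        have h1 := dext_seenLineB ws (seenWordB m w) w (contains_seenWordB_self m w)
        have h2 := hext w hcont
        exact h2.2.trans h1.2
      have hgetD : (seenWordB m w).getD w 0 = M.getD w 0 := by
        rw [PySem.Dict.getD_eq_get?_getD, PySem.Dict.getD_eq_get?_getD, hMw]
      have hfirst : (w :: ws).foldl encodeWordA ((m.size : Int), m, cl) =
          ws.foldl encodeWordA (((seenWordB m w).size : Int), seenWordB m w,
            cl ++ [(seenWordB m w).getD w 0]) := by
        simp only [List.foldl_cons]
        congr 1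
        unfold encodeWordA seenWordB
        by_cases h : m.contains w = true
        · simp [h]
        · simp only [Bool.not_eq_true] at h
          simp [h, PySem.Dict.size_insert]
      rw [hfirst, ih (seenWordB m w) (cl ++ [(seenWordB m w).getD w 0]) hext]
      simp [hgetD, seenLineB]

-- A's outer loop computes B's pass-1 map and B's translated lines for the remaining data.
theorem outer_spec (rest : List (List String)) (m M : PySem.Dict String Int)
    (obs : List (List Int)) (hext : DExt (rest.foldl seenLineB m) M) :
    rest.foldl encodeLineA ((m.size : Int), obs, m) =
      (((rest.foldl seenLineB m).size : Int), obs ++ rest.map (fun line => line.map (fun w => M.getD w 0)),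
        rest.foldl seenLineB m) := by
  induction rest generalizing m obs with
  | nil => simp
  | cons l ls ih =>
      have hstep : (l :: ls).foldl seenLineB m = ls.foldl seenLineB (seenLineB m l) := by
        simp
      rw [hstep] at hext
      have hextl : DExt (seenLineB m l) M :=
        dext_trans (dext_foldl_seenLineB ls (seenLineB m l)) hext
      simp only [List.foldl_cons]
      have h1 : encodeLineA ((m.size : Int), obs, m) l =
          (((seenLineB m l).size : Int), obs ++ [l.map (fun w => M.getD w 0)], seenLineB m l) := by
        unfold encodeLineA
        rw [inner_spec l m M [] hextl]
        simp
      rw [h1, ih (seenLineB m l) (obs ++ [l.map (fun w => M.getD w 0)])]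
      · simp
      · rw [← hstep] at hext ⊢; exact hext

-- ===== VERDICT (by name: the statement is the Claim_ definition above) =====
theorem encode_spec : Claim_equal_encode := by
  intro data _
  unfold Spec_encode encode encode_alt
  have h := outer_spec data PySem.Dict.empty (data.foldl seenLineB PySem.Dict.empty) []
    (dext_refl _)
  simp only [PySem.Dict.size_empty, Nat.cast_zero, List.nil_append] at h
  simp [h]
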